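-- pv_equiv track=rewrite | github.com/DmitriiPodgalo/Vagus | FastQC_functions.py | calculate_quality_per_base
-- ===== SOURCE A (Python) =====
-- def max_read_length(lst):
--     """
--     Function that calculates the greatest read length, using a list of reads.
--     """
--     l_max = 0  # We set maximal length equal to zero
--
--     # And then for each sequence in a list we compare its length to current l_max
--     for k in lst:
--         if len(k) > l_max:
--             # Update l_max if len(k) is greater:
--             l_max = len(k)
--
--     return l_max
--
-- def calculate_quality_per_base(parsed_file):
--     """
--     Function that calculates quality score per base.
--     The positions(bp) will be the keys in this dictionary
--     and the values will contain the lists of quality scores in each position.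
--     We process the 3rd element of 'reads' list (quality score sequences)
--
--     In the next step (plot drawing) we will need to turn dictionary into dataframe.
--     Therefore, we need all values (which are lists) to contain equal number of elements.
--     This number will be equal to the max read length.
--     """
--     qualities_per_base = dict()  # the new empty dictionary is created
--
--     qualities = []
--     for read in parsed_file:
--         qualities.append(read[3])  # the 3rd element of 'read' list  is quality score sequences
--     n = max_read_length(qualities)
--
--     for qual_seq in qualities:
--         # For each quality score sequence we add 1 value for each key of 'qualities_per_base' dictionary
--         for i in range(n):
--
--             # If this specific read contains >= i symbols, we add specific score to the list:
--             if i < len(qual_seq):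
--                 if i + 1 not in qualities_per_base:
--                     # For the symbol in quality score line, we calculate its number in ascii
--                     # table and subtract 33
--                     qualities_per_base[i + 1] = [ord(qual_seq[i]) - 33]
--                 else:
--                     qualities_per_base[i + 1].append(ord(qual_seq[i]) - 33)
--
--             # If this specific read contains less then i symbols, we add None to the list:
--             else:
--                 if i + 1 not in qualities_per_base:
--                     qualities_per_base[i + 1] = [None]
--                 else:
--                     qualities_per_base[i + 1].append(None)
--
--     return qualities_per_base
-- ===== SOURCE B (Python) =====
-- from itertools import zip_longest
--
--
-- def calculate_quality_per_base(parsed_file):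
--     score_lists = [[ord(c) - 33 for c in read[3]] for read in parsed_file]
--     return {i: list(col)
--             for i, col in enumerate(zip_longest(*score_lists), start=1)}
-- ===== Notes on version B (the rewrite author's own statement) =====
-- stated objective: idiomatic
-- what changed: B precomputes each read's score list once and builds the whole dict by transposing the rows with itertools.zip_longest and enumerating the columns from 1, instead of A's per-read inner loop over range(max length) that pads and grows each dict entry key by key.
import Mathlib
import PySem

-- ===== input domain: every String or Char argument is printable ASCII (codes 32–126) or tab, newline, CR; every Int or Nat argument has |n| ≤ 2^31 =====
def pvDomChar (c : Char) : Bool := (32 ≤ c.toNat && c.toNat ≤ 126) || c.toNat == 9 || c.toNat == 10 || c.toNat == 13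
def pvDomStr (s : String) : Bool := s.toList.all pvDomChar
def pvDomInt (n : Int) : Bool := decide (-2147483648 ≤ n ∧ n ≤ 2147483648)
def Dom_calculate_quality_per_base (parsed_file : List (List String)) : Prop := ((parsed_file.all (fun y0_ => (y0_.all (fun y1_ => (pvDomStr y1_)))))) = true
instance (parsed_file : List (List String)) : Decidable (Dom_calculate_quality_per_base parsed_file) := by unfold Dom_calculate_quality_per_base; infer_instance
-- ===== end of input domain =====

-- B replaces A's key-by-key dict filling with one transpose (zip_longest) of precomputed score rows; objective: idiomatic/alternative.

-- ===== PORT A =====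
-- helper of A: greatest read length
def max_read_length (lst : List String) : Int :=
  lst.foldl (fun l_max k => if PySem.Str.len k > l_max then PySem.Str.len k else l_max) 0

-- the body of A's inner 'for i in range(n)' loop; the '.getD' fallbacks are never
-- taken: 'i < len(qual_seq)' guards the character access (exact on the admitted inputs)
def pvStepA (qual_seq : String) (d : PySem.Dict Int (List (Option Int))) (i : Int) :
    PySem.Dict Int (List (Option Int)) :=
  if i < PySem.Str.len qual_seq then
    let v : Int := ((PySem.Str.pyGet? qual_seq i).map (fun c => (c.toNat : Int))).getD 0 - 33
    if d.contains (i + 1) = false then d.insert (i + 1) [some v]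
    else d.modify (i + 1) [] (fun l => l ++ [some v])
  else
    if d.contains (i + 1) = false then d.insert (i + 1) [(none : Option Int)]
    else d.modify (i + 1) [] (fun l => l ++ [(none : Option Int)])

def calculate_quality_per_base (parsed_file : List (List String)) : List (Int × List (Option Int)) :=
  let qualities : List String :=
    parsed_file.foldl (fun qs read => qs ++ [(PySem.List.pyGet? read 3).getD ""]) []
  let n := max_read_length qualities
  (qualities.foldl (fun d qual_seq => (PySem.List.pyRange 0 n 1).foldl (pvStepA qual_seq) d)
    PySem.Dict.empty).items

-- ===== PORT B =====
-- B helper: one read's quality scores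
def pvScores (q : String) : List Int := q.toList.map (fun c => (c.toNat : Int) - 33)

-- itertools.zip_longest(*rows, fillvalue=None), columns as lists
def pvZipLongest (rows : List (List Int)) : List (List (Option Int)) :=
  if h : rows.all (·.isEmpty) then []
  else rows.map (·.head?) :: pvZipLongest (rows.map (·.tail))
termination_by (rows.map (·.length)).sum
decreasing_by
  simp only [List.all_eq_true, List.isEmpty_iff] at h
  rw [not_forall] at h
  obtain ⟨l, hl⟩ := h
  rw [Classical.not_imp] at hl
  obtain ⟨hl, hne⟩ := hl
  simp only [List.map_map, Function.comp_def, List.attach_map_val]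
  refine List.sum_lt_sum (fun x : List Int => x.tail.length) (fun x : List Int => x.length) (fun i _ => ?_) ⟨l, hl, ?_⟩
  · simp [List.length_tail]
  · have := List.length_pos_iff.mpr hne
    simp only [List.length_tail]; omega

def calculate_quality_per_base_alt (parsed_file : List (List String)) : List (Int × List (Option Int)) :=
  let score_lists := parsed_file.map (fun read => pvScores ((PySem.List.pyGet? read 3).getD ""))
  PySem.List.enumerate (pvZipLongest score_lists) 1

-- ===== PRECONDITION & SPEC =====
-- A reads read[3] of every row: a row with fewer than 4 fields makes Python raise IndexError.
def Pre_calculate_quality_per_base (parsed_file : List (List String)) : Prop :=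
  ∀ read ∈ parsed_file, 3 < read.length
instance (parsed_file : List (List String)) : Decidable (Pre_calculate_quality_per_base parsed_file) := by
  unfold Pre_calculate_quality_per_base; infer_instance

def pvWitness_calculate_quality_per_base : List (List String) :=
  [["@r1", "ACGT", "+", "II5!"], ["@r2", "AC", "+", "7I"]]

def Spec_calculate_quality_per_base (parsed_file : List (List String)) (out : List (Int × List (Option Int))) : Prop := out = calculate_quality_per_base_alt parsed_file
instance (parsed_file : List (List String)) (out : List (Int × List (Option Int))) : Decidable (Spec_calculate_quality_per_base parsed_file out) := by unfold Spec_calculate_quality_per_base; infer_instance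

-- ===== CLAIM (what is proved, stated in full; the proofs are below) =====
def Claim_equal_calculate_quality_per_base : Prop := ∀ (parsed_file : List (List String)), Dom_calculate_quality_per_base parsed_file → Pre_calculate_quality_per_base parsed_file → Spec_calculate_quality_per_base parsed_file (calculate_quality_per_base parsed_file)

-- ===== LEMMAS AND PROOFS =====

-- the common shape both programs compute: column j is read-by-read entry j
def pvEntry (q : String) (j : Nat) : Option Int := q.toList[j]?.map (fun c => (c.toNat : Int) - 33)

def pvTarget (qs : List String) (N : Nat) : List (Int × List (Option Int)) :=
  (List.range N).map (fun (j : Nat) => (((j : Int) + 1), qs.map (fun q => pvEntry q j)))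

def pvN (qs : List String) : Nat := qs.foldr (fun q m => max q.toList.length m) 0

def pvM (rows : List (List Int)) : Nat := rows.foldr (fun l m => max l.length m) 0

-- ---- A-side ----

theorem pv_mrl_aux (qs : List String) : ∀ (m : Nat),
    qs.foldl (fun l_max k => if PySem.Str.len k > l_max then PySem.Str.len k else l_max) ((m : Nat) : Int)
      = ((max m (pvN qs) : Nat) : Int) := by
  induction qs with
  | nil => intro m; simp [pvN]
  | cons q qs ih =>
    intro m
    simp only [List.foldl_cons]
    rw [show (if PySem.Str.len q > (m : Int) then PySem.Str.len q else (m : Int))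
          = ((max m q.toList.length : Nat) : Int) by
        simp only [PySem.Str.len_eq]; split_ifs <;> omega]
    rw [ih]
    have hN : pvN (q :: qs) = max q.toList.length (pvN qs) := by simp [pvN]
    rw [hN]
    congr 1
    omega

theorem pv_mrl (qs : List String) : max_read_length qs = ((pvN qs : Nat) : Int) := by
  have h := pv_mrl_aux qs 0
  simpa [max_read_length] using h

theorem pv_step_val (q : String) (k : Nat) (d : PySem.Dict Int (List (Option Int))) :
    pvStepA q d (k : Int) =
      (if d.contains ((k : Int) + 1) = false then d.insert ((k : Int) + 1) [pvEntry q k]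
       else d.modify ((k : Int) + 1) [] (fun l => l ++ [pvEntry q k])) := by
  by_cases hk : k < q.toList.length
  · have hg : ((k : Int) < PySem.Str.len q) := by rw [PySem.Str.len_eq]; exact_mod_cast hk
    have hc : q.toList[k]? = some q.toList[k] := List.getElem?_eq_getElem hk
    simp only [pvStepA]
    rw [if_pos hg]
    simp [hc, pvEntry]
  · have hg : ¬ ((k : Int) < PySem.Str.len q) := by rw [PySem.Str.len_eq]; omega
    have hc : q.toList[k]? = none := List.getElem?_eq_none (by omega)
    simp only [pvStepA]
    rw [if_neg hg]
    simp [pvEntry, hc]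

theorem pv_inner_first (q : String) : ∀ (len a : Nat),
    (((List.range' a len).map (fun k => ((k : Nat) : Int))).foldl (pvStepA q)
        ⟨(List.range a).map (fun (j : Nat) => (((j : Int) + 1), [pvEntry q j]))⟩)
      = ⟨(List.range (a + len)).map (fun (j : Nat) => (((j : Int) + 1), [pvEntry q j]))⟩ := by
  intro len
  induction len with
  | zero => intro a; simp
  | succ len ih =>
    intro a
    rw [List.range'_succ]
    simp only [List.map_cons, List.foldl_cons]
    rw [pv_step_val]
    have hcont : (PySem.Dict.mk ((List.range a).map fun (j : Nat) => (((j : Int) + 1), [pvEntry q j]))).contains ((a : Int) + 1) = false := by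
      simp only [PySem.Dict.contains, List.any_map, List.any_eq_false,
        Function.comp_def, List.mem_range]
      intro j hj
      show ¬((((j : Int) + 1, [pvEntry q j]).1) == ((a : Int) + 1)) = true
      simp only [beq_iff_eq]
      intro hEq
      have : j = a := by omega
      omega
    rw [hcont, if_pos rfl]
    rw [show (PySem.Dict.mk ((List.range a).map fun (j : Nat) => (((j : Int) + 1), [pvEntry q j]))).insert ((a : Int) + 1) [pvEntry q a]
          = ⟨(List.range (a + 1)).map fun (j : Nat) => (((j : Int) + 1), [pvEntry q j])⟩ by
        simp only [PySem.Dict.insert, hcont, Bool.false_eq_true, if_false]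
        rw [List.range_succ, List.map_append]
        simp]
    rw [show a + (len + 1) = (a + 1) + len by omega]
    exact ih (a + 1)

theorem pv_inner_app (q : String) (f : Nat → List (Option Int)) : ∀ (len a N : Nat), a + len = N →
    (((List.range' a len).map (fun k => ((k : Nat) : Int))).foldl (pvStepA q)
        ⟨(List.range N).map (fun (j : Nat) => (((j : Int) + 1), if j < a then f j ++ [pvEntry q j] else f j))⟩)
      = ⟨(List.range N).map (fun (j : Nat) => (((j : Int) + 1), f j ++ [pvEntry q j]))⟩ := by
  intro len
  induction len with
  | zero =>
    intro a N hN
    simp only [List.range', List.map_nil, List.foldl_nil]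
    congr 1
    refine List.map_congr_left (fun j hj => ?_)
    simp only [List.mem_range] at hj
    rw [if_pos (by omega)]
  | succ len ih =>
    intro a N hN
    rw [List.range'_succ]
    simp only [List.map_cons, List.foldl_cons]
    rw [pv_step_val]
    have hmem : (((a : Int) + 1), f a) ∈
        ((List.range N).map (fun (j : Nat) => (((j : Int) + 1), if j < a then f j ++ [pvEntry q j] else f j))) := by
      refine List.mem_map.mpr ⟨a, List.mem_range.mpr (by omega), ?_⟩
      rw [if_neg (by omega)]
    have hnodup : (PySem.Dict.mk ((List.range N).map (fun (j : Nat) => (((j : Int) + 1), if j < a then f j ++ [pvEntry q j] else f j)))).keys.Nodup := by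
      simp only [PySem.Dict.keys, List.map_map, Function.comp_def]
      exact List.Nodup.map (fun x y hxy => by omega) List.nodup_range
    have hcont : (PySem.Dict.mk ((List.range N).map (fun (j : Nat) => (((j : Int) + 1), if j < a then f j ++ [pvEntry q j] else f j)))).contains ((a : Int) + 1) = true := by
      simp only [PySem.Dict.contains]
      exact List.any_eq_true.mpr ⟨_, hmem, by simp⟩
    rw [hcont]
    simp only [Bool.true_eq_false, if_false]
    rw [show (PySem.Dict.mk ((List.range N).map (fun (j : Nat) => (((j : Int) + 1), if j < a then f j ++ [pvEntry q j] else f j)))).modify ((a : Int) + 1) [] (fun l => l ++ [pvEntry q a])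
          = ⟨(List.range N).map (fun (j : Nat) => (((j : Int) + 1), if j < a + 1 then f j ++ [pvEntry q j] else f j))⟩ by
        simp only [PySem.Dict.modify]
        rw [PySem.Dict.getD_of_mem_items _ hmem hnodup]
        simp only [PySem.Dict.insert, hcont, if_true]
        congr 1
        simp only [List.map_map]
        refine List.map_congr_left (fun j hj => ?_)
        simp only [List.mem_range] at hj
        simp only [Function.comp_def, beq_iff_eq]
        by_cases hja : j = a
        · subst hja
          rw [if_pos rfl, if_pos (by omega)]
        · rw [if_neg (by intro hEq; exact hja (by omega))]
          by_cases hlt : j < a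
          · rw [if_pos hlt, if_pos (by omega)]
          · rw [if_neg hlt, if_neg (by omega)]]
    exact ih (a + 1) N (by omega)

theorem pv_outer (N : Nat) : ∀ (rest : List String) (f : Nat → List (Option Int)),
    (rest.foldl (fun d q => (((List.range N).map (fun k => ((k : Nat) : Int))).foldl (pvStepA q) d))
        ⟨(List.range N).map (fun (j : Nat) => (((j : Int) + 1), f j))⟩)
      = ⟨(List.range N).map (fun (j : Nat) => (((j : Int) + 1), f j ++ rest.map (fun q => pvEntry q j)))⟩ := by
  intro rest
  induction rest with
  | nil => intro f; simp
  | cons q rest ih =>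
    intro f
    simp only [List.foldl_cons]
    have hstart : (PySem.Dict.mk ((List.range N).map (fun (j : Nat) => (((j : Int) + 1), f j))))
        = ⟨(List.range N).map (fun (j : Nat) => (((j : Int) + 1), if j < 0 then f j ++ [pvEntry q j] else f j))⟩ := by
      simp
    have happ := pv_inner_app q f N 0 N (by omega)
    rw [← List.range_eq_range'] at happ
    rw [hstart, happ, ih (fun j => f j ++ [pvEntry q j])]
    congr 1
    refine List.map_congr_left (fun j _ => ?_)
    simp [List.append_assoc]

theorem pv_A_eq (pf : List (List String)) :
    calculate_quality_per_base pf =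
      pvTarget (pf.map (fun read => (PySem.List.pyGet? read 3).getD ""))
        (pvN (pf.map (fun read => (PySem.List.pyGet? read 3).getD ""))) := by
  simp only [calculate_quality_per_base]
  rw [PySem.List.foldl_append_singleton_eq_map, List.nil_append, pv_mrl,
    PySem.List.pyRange_zero_nat]
  generalize hqs : pf.map (fun read => (PySem.List.pyGet? read 3).getD "") = qs
  cases qs with
  | nil => simp [pvN, pvTarget, PySem.Dict.empty]
  | cons q rest =>
    simp only [List.foldl_cons]
    have hfirst := pv_inner_first q (pvN (q :: rest)) 0
    rw [← List.range_eq_range'] at hfirst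
    simp only [List.range_zero, List.map_nil, Nat.zero_add] at hfirst
    rw [show (PySem.Dict.empty : PySem.Dict Int (List (Option Int))) = ⟨[]⟩ from rfl, hfirst,
      pv_outer (pvN (q :: rest)) rest (fun j => [pvEntry q j])]
    simp only [pvTarget, List.map_cons]
    refine List.map_congr_left (fun j _ => ?_)
    simp

-- ---- B-side ----

theorem pv_M_zero {rows : List (List Int)} (h : pvM rows = 0) : rows.all (·.isEmpty) = true := by
  induction rows with
  | nil => rfl
  | cons l rows ih =>
    simp only [pvM, List.foldr_cons] at h
    have h1 : l.length = 0 := by omega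
    have h2 : pvM rows = 0 := by simp only [pvM]; omega
    simp [List.length_eq_zero_iff.mp h1, ih h2]

theorem pv_M_tail (rows : List (List Int)) : pvM (rows.map (·.tail)) = pvM rows - 1 := by
  induction rows with
  | nil => rfl
  | cons l rows ih =>
    simp only [pvM, List.map_cons, List.foldr_cons, List.length_tail] at *
    omega

theorem pv_M_of_all_empty {rows : List (List Int)} (h : rows.all (·.isEmpty) = true) :
    pvM rows = 0 := by
  induction rows with
  | nil => rfl
  | cons l rows ih =>
    simp only [List.all_cons, Bool.and_eq_true, List.isEmpty_iff] at h
    simp only [pvM, List.foldr_cons] at *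
    rw [h.1]
    simp [ih h.2]

theorem pv_zl : ∀ (N : Nat) (rows : List (List Int)), pvM rows = N →
    pvZipLongest rows = (List.range N).map (fun j => rows.map (fun l => l[j]?)) := by
  intro N
  induction N with
  | zero =>
    intro rows h
    rw [pvZipLongest]
    simp [pv_M_zero h]
  | succ n ih =>
    intro rows h
    rw [pvZipLongest]
    have hne : rows.all (·.isEmpty) = false := by
      cases hA : rows.all (·.isEmpty)
      · rfl
      · exact absurd (pv_M_of_all_empty hA) (by omega)
    rw [dif_neg (by simp [hne])]
    rw [ih (rows.map (·.tail)) (by rw [pv_M_tail, h]; omega)]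
    rw [List.range_succ_eq_map]
    simp only [List.map_cons, List.map_map, Function.comp_def, List.getElem?_tail,
      List.head?_eq_getElem?, Nat.succ_eq_add_one]

theorem pv_enum_map_range (N : Nat) (g : Nat → List (Option Int)) (s : Int) :
    PySem.List.enumerate ((List.range N).map g) s
      = (List.range N).map (fun (j : Nat) => (s + (j : Int), g j)) := by
  induction N with
  | zero => simp [PySem.List.enumerate_nil]
  | succ n ih =>
    rw [List.range_succ, List.map_append, List.map_append, PySem.List.enumerate_append, ih]
    simp [PySem.List.enumerate_cons]

theorem pv_M_scores (qs : List String) : pvM (qs.map pvScores) = pvN qs := by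
  induction qs with
  | nil => rfl
  | cons q qs ih => simp only [pvM, pvN, pvScores, List.map_cons, List.foldr_cons,
      List.length_map] at *; omega

theorem pv_B_eq (pf : List (List String)) :
    calculate_quality_per_base_alt pf =
      pvTarget (pf.map (fun read => (PySem.List.pyGet? read 3).getD ""))
        (pvN (pf.map (fun read => (PySem.List.pyGet? read 3).getD ""))) := by
  simp only [calculate_quality_per_base_alt]
  rw [show (pf.map (fun read => pvScores ((PySem.List.pyGet? read 3).getD "")))
        = (pf.map (fun read => (PySem.List.pyGet? read 3).getD "")).map pvScores from by
      rw [List.map_map]; rfl]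
  generalize hqs : pf.map (fun read => (PySem.List.pyGet? read 3).getD "" : List String → String) = qs
  rw [pv_zl (pvN qs) (qs.map pvScores) (pv_M_scores qs), pv_enum_map_range]
  simp only [pvTarget]
  refine List.map_congr_left (fun j _ => ?_)
  refine Prod.ext (by simp [Int.add_comm]) ?_
  simp only [List.map_map, Function.comp_def]
  refine List.map_congr_left (fun q _ => ?_)
  simp [pvScores, pvEntry, List.getElem?_map]

-- ===== VERDICT (by name: the statement is the Claim_ definition above) =====
theorem calculate_quality_per_base_spec : Claim_equal_calculate_quality_per_base := by
  intro pf _ _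
  unfold Spec_calculate_quality_per_base
  rw [pv_A_eq, pv_B_eq]
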